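-- pv_equiv track=rewrite | github.com/Nikolas-Pensyl/AdventOfCode | 2024/day17pt2.py | revProg
-- ===== SOURCE A (Python) =====
-- def revProg(prog, ans):
--     if len(prog)==0: return ans
--
--     for i in range(8):
--         na = (ans<<3) | i
--         b = na%8
--         b=b^5
--         c=na>>b
--         b=b^c
--         b=b^6
--
--         if (b%8)==prog[-1]:
--             opt = revProg(prog[:-1], na)
--             if opt is None: continue
--
--             return opt
-- ===== SOURCE B (Python) =====
-- def revProg(prog, ans):
--     # BFS over a whole frontier of partial answers, level by level (last program
--     # value first), then the smallest surviving candidate -- instead of A's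
--     # first-success recursive DFS.
--     candidates = [ans]
--     for target in reversed(prog):
--         nxt = []
--         for c in candidates:
--             for i in range(8):
--                 na = (c << 3) | i
--                 b = na % 8
--                 b = b ^ 5
--                 cc = na >> b
--                 b = b ^ cc
--                 b = b ^ 6
--                 if b % 8 == target:
--                     nxt.append(na)
--         candidates = nxt
--     return min(candidates) if candidates else None
-- ===== Notes on version B (the rewrite author's own statement) =====
-- stated objective: alternative
-- what changed: Replaced A's first-success recursive DFS over 3-bit digit choices by an iterative breadth-first frontier that keeps every surviving partial answer level by level and returns the smallest survivor at the end (equal because candidates grow monotonically in the digit path, so the DFS-first result is the numeric minimum).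
import Mathlib
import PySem

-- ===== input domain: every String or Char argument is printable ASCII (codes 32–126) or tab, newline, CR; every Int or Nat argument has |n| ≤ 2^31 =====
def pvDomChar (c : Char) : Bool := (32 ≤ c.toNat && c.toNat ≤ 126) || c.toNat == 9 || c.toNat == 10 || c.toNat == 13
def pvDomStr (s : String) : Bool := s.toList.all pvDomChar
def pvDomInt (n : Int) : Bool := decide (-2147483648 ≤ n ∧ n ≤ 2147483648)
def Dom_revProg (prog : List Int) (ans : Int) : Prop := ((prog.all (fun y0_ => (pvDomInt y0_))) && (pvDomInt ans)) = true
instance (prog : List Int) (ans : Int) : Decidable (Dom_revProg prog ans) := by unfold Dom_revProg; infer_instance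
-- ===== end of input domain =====

-- B replaces A's first-success recursive DFS by an iterative level-by-level frontier
-- (all surviving partial answers), returning the smallest survivor (objective: alternative).

-- ===== PORT A =====
-- A's for-loop with early return; prog[-1] / prog[:-1] are evaluated in the non-empty
-- branch, where Python's indexing succeeds (pyGetD's default is never used).
mutual
def revProg (prog : List Int) (ans : Int) : Option Int :=
  if h : prog.length = 0 then some ans
  else revProgLoop (PySem.List.slice prog none (some (-1)))
        (PySem.List.pyGetD prog (-1) 0) ans (PySem.List.pyRange 0 8 1)
termination_by (prog.length, 1, 0)
decreasing_by
  simp [PySem.List.slice_to_neg_one, Prod.lex_def, List.length_dropLast]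
  omega

def revProgLoop (tail : List Int) (last : Int) (ans : Int) (is : List Int) : Option Int :=
  match is with
  | [] => none
  | i :: rest =>
    let na := PySem.Int.bor (ans <<< (3:Nat)) i
    let b1 := PySem.Int.bxor (PySem.Int.mod na 8) 5
    let c := na >>> b1.toNat      -- Python na >> b: b is a floor-mod-8 value xor 5, hence in [0,8)
    let b2 := PySem.Int.bxor (PySem.Int.bxor b1 c) 6
    if PySem.Int.mod b2 8 = last then
      match revProg tail na with
      | some v => some v
      | none => revProgLoop tail last ans rest
    else revProgLoop tail last ans rest
termination_by (tail.length + 1, 0, is.length)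
decreasing_by
  · simp [Prod.lex_def]
  · simp [Prod.lex_def]
  · simp [Prod.lex_def]
end

-- ===== PORT B =====
def revProgStep (cands : List Int) (target : Int) : List Int :=
  cands.foldl (fun (nxt : List Int) (c : Int) =>
    (PySem.List.pyRange 0 8 1).foldl (fun (nxt : List Int) (i : Int) =>
      let na := PySem.Int.bor (c <<< (3:Nat)) i
      let b1 := PySem.Int.bxor (PySem.Int.mod na 8) 5
      let cc := na >>> b1.toNat
      let b2 := PySem.Int.bxor (PySem.Int.bxor b1 cc) 6
      if PySem.Int.mod b2 8 = target then nxt ++ [na] else nxt) nxt) []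

def revProg_alt (prog : List Int) (ans : Int) : Option Int :=
  let cands := prog.reverse.foldl revProgStep [ans]
  if cands.isEmpty then none else PySem.List.min? cands (fun x => x)

-- ===== PRECONDITION & SPEC =====
def Spec_revProg (prog : List Int) (ans : Int) (out : Option Int) : Prop := out = revProg_alt prog ans
instance (prog : List Int) (ans : Int) (out : Option Int) : Decidable (Spec_revProg prog ans out) := by unfold Spec_revProg; infer_instance

-- ===== CLAIM (what is proved, stated in full; the proofs are below) =====
def Claim_equal_revProg : Prop := ∀ (prog : List Int) (ans : Int), Dom_revProg prog ans → Spec_revProg prog ans (revProg prog ans)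

-- ===== LEMMAS AND PROOFS =====

-- the shared per-step check value: Python's b after the bit-twiddle, reduced mod 8
def pvB (na : Int) : Int :=
  let b1 := PySem.Int.bxor (PySem.Int.mod na 8) 5
  PySem.Int.mod (PySem.Int.bxor (PySem.Int.bxor b1 (na >>> b1.toNat)) 6) 8

-- all surviving complete candidates, in DFS (= numeric) order; r is the reversed program
def pvF : List Int → Int → List Int
  | [], a => [a]
  | x :: rs, a =>
      ((PySem.List.pyRange 0 8 1).filter
          (fun i => pvB (PySem.Int.bor (a <<< (3:Nat)) i) = x)).flatMap
        (fun i => pvF rs (PySem.Int.bor (a <<< (3:Nat)) i))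

theorem pvOr3 (m : Nat) (b0 b1 b2 : Bool) :
    (Nat.bit false (Nat.bit false (Nat.bit false m))) ||| (Nat.bit b0 (Nat.bit b1 (Nat.bit b2 0))) =
    Nat.bit b0 (Nat.bit b1 (Nat.bit b2 m)) := by
  rw [Nat.lor_bit, Nat.lor_bit, Nat.lor_bit]; simp

theorem pvAnd3 (q : Nat) (b0 b1 b2 : Bool) :
    (Nat.bit true (Nat.bit true (Nat.bit true q))) &&& (Nat.bit b0 (Nat.bit b1 (Nat.bit b2 0))) =
    Nat.bit b0 (Nat.bit b1 (Nat.bit b2 0)) := by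
  rw [Nat.land_bit, Nat.land_bit, Nat.land_bit]; simp

theorem pvNatOr8 (m k : Nat) (hk : k < 8) : (8 * m) ||| k = 8 * m + k := by
  interval_cases k
  · simp
  · have := pvOr3 m true false false; simp [Nat.bit] at this
    rw [show 8*m = 2*(2*(2*m)) by ring, this]
  · have := pvOr3 m false true false; simp [Nat.bit] at this
    rw [show 8*m = 2*(2*(2*m)) by ring, this]; ring
  · have := pvOr3 m true true false; simp [Nat.bit] at this
    rw [show 8*m = 2*(2*(2*m)) by ring, this]; ring
  · have := pvOr3 m false false true; simp [Nat.bit] at this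
    rw [show 8*m = 2*(2*(2*m)) by ring, this]; ring
  · have := pvOr3 m true false true; simp [Nat.bit] at this
    rw [show 8*m = 2*(2*(2*m)) by ring, this]; ring
  · have := pvOr3 m false true true; simp [Nat.bit] at this
    rw [show 8*m = 2*(2*(2*m)) by ring, this]; ring
  · have := pvOr3 m true true true; simp [Nat.bit] at this
    rw [show 8*m = 2*(2*(2*m)) by ring, this]; ring

theorem pvNatAnd7 (m k : Nat) (hm : m % 8 = 7) (hk : k < 8) : m &&& k = k := by
  obtain ⟨q, rfl⟩ : ∃ q, m = 8*q+7 := ⟨m/8, by omega⟩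
  interval_cases k
  · simp
  · norm_num
    omega
  · have := pvAnd3 q false true false
    simp only [Nat.bit, cond_true, cond_false] at this
    norm_num at this
    rw [show 8*q+7 = 2*(2*(2*q+1)+1)+1 by ring]; exact this
  · have := pvAnd3 q true true false
    simp only [Nat.bit, cond_true, cond_false] at this
    norm_num at this
    rw [show 8*q+7 = 2*(2*(2*q+1)+1)+1 by ring]; exact this
  · have := pvAnd3 q false false true
    simp only [Nat.bit, cond_true, cond_false] at this
    norm_num at this
    rw [show 8*q+7 = 2*(2*(2*q+1)+1)+1 by ring]; exact this
  · have := pvAnd3 q true false true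
    simp only [Nat.bit, cond_true, cond_false] at this
    norm_num at this
    rw [show 8*q+7 = 2*(2*(2*q+1)+1)+1 by ring]; exact this
  · have := pvAnd3 q false true true
    simp only [Nat.bit, cond_true, cond_false] at this
    norm_num at this
    rw [show 8*q+7 = 2*(2*(2*q+1)+1)+1 by ring]; exact this
  · have := pvAnd3 q true true true
    simp only [Nat.bit, cond_true] at this
    norm_num at this
    rw [show 8*q+7 = 2*(2*(2*q+1)+1)+1 by ring]; exact this

theorem pvShl3 (a : Int) : a <<< (3:Nat) = 8 * a := by
  rw [Int.shiftLeft_eq]; norm_num; ring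

theorem pvBor8 (a i : Int) (h0 : 0 ≤ i) (h1 : i < 8) :
    PySem.Int.bor (a <<< (3:Nat)) i = 8 * a + i := by
  obtain ⟨k, hk, rfl⟩ : ∃ k : Nat, k < 8 ∧ i = (k : Int) := ⟨i.toNat, by omega, by omega⟩
  rw [pvShl3]
  by_cases h : 0 ≤ a
  · lift a to Nat using h
    simp only [PySem.Int.bor]
    rw [if_pos (by positivity), if_pos (by positivity)]
    rw [show (8 * (a:Int)) = ((8*a : Nat) : Int) by push_cast; ring]
    simp only [Int.toNat_natCast]
    rw [pvNatOr8 _ _ hk]; push_cast; ring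
  · simp only [PySem.Int.bor]
    rw [if_neg (by omega), if_pos (by positivity)]
    have hm : (-(8*a)-1).toNat = 8*(-a-1).toNat + 7 := by omega
    rw [hm, Int.toNat_natCast, pvNatAnd7 _ k (by omega) hk]
    omega

-- A's loop over the remaining digit choices returns the head of the matching blocks
theorem pvLoop_eq (rs : List Int) (x a : Int)
    (H : ∀ a', revProg rs.reverse a' = (pvF rs a').head?) :
    ∀ is : List Int, revProgLoop rs.reverse x a is =
      ((is.filter (fun i => pvB (PySem.Int.bor (a <<< (3:Nat)) i) = x)).flatMap
        (fun i => pvF rs (PySem.Int.bor (a <<< (3:Nat)) i))).head? := by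
  intro is
  induction is with
  | nil => simp [revProgLoop]
  | cons i rest ih =>
    rw [revProgLoop]
    rw [show PySem.Int.mod (PySem.Int.bxor (PySem.Int.bxor
        (PySem.Int.bxor (PySem.Int.mod (PySem.Int.bor (a <<< (3:Nat)) i) 8) 5)
        ((PySem.Int.bor (a <<< (3:Nat)) i) >>>
          (PySem.Int.bxor (PySem.Int.mod (PySem.Int.bor (a <<< (3:Nat)) i) 8) 5).toNat)) 6) 8 =
        pvB (PySem.Int.bor (a <<< (3:Nat)) i) from rfl]
    by_cases hc : pvB (PySem.Int.bor (a <<< (3:Nat)) i) = x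
    · rw [if_pos hc, H]
      rw [List.filter_cons_of_pos (by simp only [decide_eq_true_eq]; exact hc),
          List.flatMap_cons, List.head?_append]
      cases hh : (pvF rs (PySem.Int.bor (a <<< (3:Nat)) i)).head? with
      | none => simp only [Option.none_or]; exact ih
      | some v => simp only [Option.some_or]
    · rw [if_neg hc,
          List.filter_cons_of_neg (by simp only [decide_eq_true_eq]; exact hc)]
      exact ih

-- A's DFS returns the first complete candidate
theorem pvA_eq_head : ∀ (r : List Int) (a : Int), revProg r.reverse a = (pvF r a).head? := by
  intro r
  induction r with
  | nil => intro a; simp [revProg, pvF]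
  | cons x rs ih =>
    intro a
    rw [revProg]
    rw [dif_neg (by simp)]
    rw [List.reverse_cons, PySem.List.slice_to_neg_one, List.dropLast_concat,
        PySem.List.pyGetD_neg_one_append_singleton]
    rw [pvLoop_eq rs x a ih]
    rfl

-- B's inner two loops over one frontier level
theorem pvStep_eq (x : Int) : ∀ (cs init : List Int),
    (cs.foldl (fun (nxt : List Int) (c : Int) =>
      (PySem.List.pyRange 0 8 1).foldl (fun (nxt : List Int) (i : Int) =>
        let na := PySem.Int.bor (c <<< (3:Nat)) i
        let b1 := PySem.Int.bxor (PySem.Int.mod na 8) 5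
        let cc := na >>> b1.toNat
        let b2 := PySem.Int.bxor (PySem.Int.bxor b1 cc) 6
        if PySem.Int.mod b2 8 = x then nxt ++ [na] else nxt) nxt) init) =
    init ++ cs.flatMap (fun (c : Int) =>
      ((PySem.List.pyRange 0 8 1).filter
          (fun i => pvB (PySem.Int.bor (c <<< (3:Nat)) i) = x)).map
        (fun i => PySem.Int.bor (c <<< (3:Nat)) i)) := by
  intro cs
  induction cs with
  | nil => intro init; simp
  | cons c cs ih =>
    intro init
    rw [List.foldl_cons, ih]
    have hinner : (PySem.List.pyRange 0 8 1).foldl (fun (nxt : List Int) (i : Int) =>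
        let na := PySem.Int.bor (c <<< (3:Nat)) i
        let b1 := PySem.Int.bxor (PySem.Int.mod na 8) 5
        let cc := na >>> b1.toNat
        let b2 := PySem.Int.bxor (PySem.Int.bxor b1 cc) 6
        if PySem.Int.mod b2 8 = x then nxt ++ [na] else nxt) init =
        init ++ ((PySem.List.pyRange 0 8 1).filter
          (fun i => pvB (PySem.Int.bor (c <<< (3:Nat)) i) = x)).map
          (fun i => PySem.Int.bor (c <<< (3:Nat)) i) := by
      have := PySem.List.foldl_append_if
        (fun i => decide (pvB (PySem.Int.bor (c <<< (3:Nat)) i) = x))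
        (fun i : Int => PySem.Int.bor (c <<< (3:Nat)) i)
        (PySem.List.pyRange 0 8 1) init
      simpa [pvB] using this
    rw [hinner, List.flatMap_cons, List.append_assoc]

-- B's outer fold computes all candidates
theorem pvB_fold_eq : ∀ (r cs : List Int),
    r.foldl revProgStep cs = cs.flatMap (fun a => pvF r a) := by
  intro r
  induction r with
  | nil => intro cs; simp [pvF]
  | cons x rs ih =>
    intro cs
    rw [List.foldl_cons, ih]
    show (revProgStep cs x).flatMap _ = _
    rw [show revProgStep cs x = cs.flatMap (fun (c : Int) =>
      ((PySem.List.pyRange 0 8 1).filter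
          (fun i => pvB (PySem.Int.bor (c <<< (3:Nat)) i) = x)).map
        (fun i => PySem.Int.bor (c <<< (3:Nat)) i)) from by
      have := pvStep_eq x cs []
      simpa [revProgStep] using this]
    rw [List.flatMap_assoc]
    simp only [List.flatMap_map]
    rfl

-- every candidate lies in the block determined by its seed
theorem pvF_bounds : ∀ (r : List Int) (a v : Int), v ∈ pvF r a →
    8 ^ r.length * a ≤ v ∧ v < 8 ^ r.length * (a + 1) := by
  intro r
  induction r with
  | nil => intro a v hv; simp [pvF] at hv; subst hv; norm_num
  | cons x rs ih =>
    intro a v hv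
    simp only [pvF, List.mem_flatMap, List.mem_filter] at hv
    obtain ⟨i, ⟨hir, _⟩, hvi⟩ := hv
    rw [PySem.List.mem_pyRange_one] at hir
    rw [pvBor8 a i hir.1 hir.2] at hvi
    have := ih (8 * a + i) v hvi
    have hp : (0:Int) < 8 ^ rs.length := by positivity
    simp only [List.length_cons, pow_succ]
    constructor <;> nlinarith [this.1, this.2, hir.1, hir.2]

-- the candidate list is strictly increasing
theorem pvChain (rs : List Int) (a : Int) (hblk : ∀ b, (pvF rs b).Pairwise (· < ·)) :
    ∀ L : List Int, L.Pairwise (· < ·) → (∀ i ∈ L, 0 ≤ i ∧ i < 8) →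
      (L.flatMap (fun i => pvF rs (PySem.Int.bor (a <<< (3:Nat)) i))).Pairwise (· < ·) := by
  intro L
  induction L with
  | nil => intro _ _; simp
  | cons i L ih =>
    intro hL hmem
    rw [List.flatMap_cons, List.pairwise_append]
    refine ⟨hblk _, ih (List.pairwise_cons.mp hL).2 (fun j hj => hmem j (List.mem_cons_of_mem _ hj)), ?_⟩
    intro v hv w hw
    rw [List.mem_flatMap] at hw
    obtain ⟨i', hi', hw⟩ := hw
    have hii' : i < i' := (List.pairwise_cons.mp hL).1 i' hi'
    have hi8 := hmem i (List.mem_cons_self)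
    have hi'8 := hmem i' (List.mem_cons_of_mem _ hi')
    rw [pvBor8 a i hi8.1 hi8.2] at hv
    rw [pvBor8 a i' hi'8.1 hi'8.2] at hw
    have h1 := (pvF_bounds rs _ v hv).2
    have h2 := (pvF_bounds rs _ w hw).1
    have hp : (0:Int) < 8 ^ rs.length := by positivity
    nlinarith [h1, h2, hp]

theorem pvF_sorted : ∀ (r : List Int) (a : Int), (pvF r a).Pairwise (· < ·) := by
  intro r
  induction r with
  | nil => intro a; simp [pvF]
  | cons x rs ih =>
    intro a
    simp only [pvF]
    apply pvChain rs a ih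
    · exact List.Pairwise.filter _ (PySem.List.pairwise_lt_pyRange_one 0 8)
    · intro i hi
      have := (List.mem_filter.mp hi).1
      rw [PySem.List.mem_pyRange_one] at this
      exact this

theorem pvFoldlMin (t : List Int) (h : Int) (hle : ∀ y ∈ t, h ≤ y) : t.foldl min h = h := by
  induction t with
  | nil => rfl
  | cons y t ih =>
    rw [List.foldl_cons, min_eq_left (hle y List.mem_cons_self)]
    exact ih (fun z hz => hle z (List.mem_cons_of_mem _ hz))

-- ===== VERDICT (by name: the statement is the Claim_ definition above) =====
theorem revProg_spec : Claim_equal_revProg := by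
  intro prog ans _dom
  show revProg prog ans = revProg_alt prog ans
  have hA : revProg prog ans = (pvF prog.reverse ans).head? := by
    have := pvA_eq_head prog.reverse ans
    rwa [List.reverse_reverse] at this
  have hB : prog.reverse.foldl revProgStep [ans] = pvF prog.reverse ans := by
    rw [pvB_fold_eq, List.flatMap_singleton]
  rw [hA]
  unfold revProg_alt
  rw [hB]
  rcases hl : pvF prog.reverse ans with _ | ⟨h, t⟩
  · simp
  · have hsort := pvF_sorted prog.reverse ans
    rw [hl, List.pairwise_cons] at hsort
    rw [if_neg (by simp)]
    rw [PySem.List.min?_id_cons, pvFoldlMin t h (fun y hy => le_of_lt (hsort.1 y hy))]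
    simp
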